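-- pv_equiv track=rewrite | github.com/Hung-3008/mecognize-fpt-aic-2023 | utils.py | get_brand_and_related
-- ===== SOURCE A (Python) =====
-- def get_brand_and_related(data):
--
--   label_list = []
--   diagnoes = []
--   date = []
--   for item in data:
--     try:
--       if item['pred'] != 'O':
--         if item['pred'] == 'DIAGNOSE':
--           diagnoes.append(item['transcription'])
--         elif item['pred'] == 'DATE':
--           date.append(item['transcription'])
--         else:
--           label_list.append({'label': item['pred'], 'text': item['transcription']})
--     except:
--       continue
--
--   medicines_list = []
--
--
--   while len(label_list) > 0:
--     item = label_list.pop(0)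
--     if item['label'] == 'BRANDNAME':
--         medicines = {
--             'brandname': [],
--             'usage': [],
--             'quantity': [],
--         }
--         medicines['brandname'].append(item['text'])
--         while len(label_list) > 0:
--             item = label_list.pop(0)
--             if item['label'] == 'USAGE':
--                 medicines['usage'].append(item['text'])
--             elif item['label'] == 'QUANTITY':
--                 medicines['quantity'].append(item['text'])
--             else:
--                 label_list.insert(0, item)
--                 break
--         medicines_list.append(medicines)
--     else:
--         continue
--   return diagnoes, medicines_list, date
-- ===== SOURCE B (Python) =====
-- def get_brand_and_related(data):
--     pairs = [(it.get('pred'), it.get('transcription')) for it in data]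
--     pairs = [(p, t) for p, t in pairs if p is not None and t is not None]
--     diagnoes = [t for p, t in pairs if p == 'DIAGNOSE']
--     date = [t for p, t in pairs if p == 'DATE']
--     labels = [(p, t) for p, t in pairs if p not in ('O', 'DIAGNOSE', 'DATE')]
--
--     medicines_list = []
--     cur = None  # open record as a (brandname, usage, quantity) triple of lists
--     for p, t in labels:
--         if p == 'BRANDNAME':
--             if cur is not None:
--                 medicines_list.append(cur)
--             cur = ([t], [], [])
--         elif cur is not None and p == 'USAGE':
--             cur[1].append(t)
--         elif cur is not None and p == 'QUANTITY':
--             cur[2].append(t)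
--         else:
--             if cur is not None:
--                 medicines_list.append(cur)
--             cur = None
--     if cur is not None:
--         medicines_list.append(cur)
--     medicines_list = [{'brandname': b, 'usage': u, 'quantity': q}
--                       for b, u, q in medicines_list]
--     return diagnoes, medicines_list, date
-- ===== Notes on version B (the rewrite author's own statement) =====
-- stated objective: simpler
-- what changed: Phase 1 becomes a filter/comprehension pipeline over (pred, transcription) pairs, and phase 2 replaces the nested while loops with pop(0)/insert(0) on a mutable queue by a single forward pass that keeps an optional open record and flushes it on BRANDNAME, on any interrupting label, and at the end.
import Mathlib
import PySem

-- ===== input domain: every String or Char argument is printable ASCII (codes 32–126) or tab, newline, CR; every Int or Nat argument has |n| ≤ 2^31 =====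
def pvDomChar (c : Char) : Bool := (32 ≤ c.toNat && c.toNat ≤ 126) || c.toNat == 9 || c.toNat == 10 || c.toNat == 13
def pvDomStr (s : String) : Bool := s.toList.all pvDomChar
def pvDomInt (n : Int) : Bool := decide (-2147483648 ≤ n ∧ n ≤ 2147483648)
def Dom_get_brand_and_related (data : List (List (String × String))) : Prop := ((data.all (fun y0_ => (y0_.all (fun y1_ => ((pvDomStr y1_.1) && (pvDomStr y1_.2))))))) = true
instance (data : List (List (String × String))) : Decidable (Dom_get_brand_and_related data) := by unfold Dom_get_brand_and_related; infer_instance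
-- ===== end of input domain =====

-- B replaces A's queue-mutation phase 2 (pop(0)/insert(0) with a nested while) by one
-- forward pass with an optional open record, and phase 1 by a comprehension pipeline;
-- same return value, simpler decomposition.

-- ===== PORT A =====
-- phase-1 loop body: classify one item; a missing 'pred'/'transcription' key (lookup = none)
-- is Python's KeyError, swallowed by A's try/except → state unchanged
def pvStepA (st : List String × List String × List (String × String))
    (item : List (String × String)) : List String × List String × List (String × String) :=
  match item.lookup "pred" with
  | none => st
  | some p =>
    if p ≠ "O" then
      if p = "DIAGNOSE" then
        match item.lookup "transcription" with
        | none => st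
        | some t => (st.1 ++ [t], st.2.1, st.2.2)
      else if p = "DATE" then
        match item.lookup "transcription" with
        | none => st
        | some t => (st.1, st.2.1 ++ [t], st.2.2)
      else
        match item.lookup "transcription" with
        | none => st
        | some t => (st.1, st.2.1, st.2.2 ++ [(p, t)])
    else st

-- A's inner while loop: pop USAGE/QUANTITY items into the accumulators; on any other
-- label reinsert it at the front and stop (returned as head of the remaining queue)
def pvInnerA (us qs : List String) : List (String × String) →
    List String × List String × List (String × String)
  | [] => (us, qs, [])
  | (l, t) :: rest =>
    if l = "USAGE" then pvInnerA (us ++ [t]) qs rest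
    else if l = "QUANTITY" then pvInnerA us (qs ++ [t]) rest
    else (us, qs, (l, t) :: rest)

theorem pvInnerA_len (us qs : List String) (l : List (String × String)) :
    (pvInnerA us qs l).2.2.length ≤ l.length := by
  induction l generalizing us qs with
  | nil => simp [pvInnerA]
  | cons x rest ih =>
    obtain ⟨a, b⟩ := x
    simp only [pvInnerA]
    split_ifs <;> first
      | (exact le_trans (ih _ _) (by simp))
      | simp

-- A's outer while loop on the queue label_list
def pvPhase2A : List (String × String) → List (List (String × List String))
  | [] => []
  | (l, t) :: rest =>
    if l = "BRANDNAME" then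
      let r := pvInnerA [] [] rest
      [("brandname", [t]), ("usage", r.1), ("quantity", r.2.1)] :: pvPhase2A r.2.2
    else pvPhase2A rest
  termination_by l => l.length
  decreasing_by
    · exact Nat.lt_succ_of_le (pvInnerA_len [] [] rest)
    · simp

def get_brand_and_related (data : List (List (String × String))) :
    List String × (List (List (String × List String))) × List String :=
  let st := data.foldl pvStepA ([], [], [])
  (st.1, pvPhase2A st.2.2, st.2.1)

-- ===== PORT B =====
-- Source B: pairs = [(pred, transcription) for each item where both keys are present]
def pvPairsB (data : List (List (String × String))) : List (String × String) :=
  (data.map (fun it => (it.lookup "pred", it.lookup "transcription"))).filterMap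
    (fun pt => match pt with
      | (some p, some t) => some (p, t)
      | _ => none)

def pvMkRec (c : List String × List String × List String) : List (String × List String) :=
  [("brandname", c.1), ("usage", c.2.1), ("quantity", c.2.2)]

-- Source B's single forward pass: cur is the open record, flushed on BRANDNAME,
-- on an interrupting label, and at the end
def pvPhase2B : Option (List String × List String × List String) →
    List (String × String) → List (List (String × List String))
  | cur, [] => (match cur with | none => [] | some c => [pvMkRec c])
  | cur, (p, t) :: rest =>
    if p = "BRANDNAME" then
      (match cur with | none => [] | some c => [pvMkRec c]) ++
        pvPhase2B (some ([t], [], [])) rest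
    else if cur.isSome ∧ p = "USAGE" then
      pvPhase2B (cur.map (fun c => (c.1, c.2.1 ++ [t], c.2.2))) rest
    else if cur.isSome ∧ p = "QUANTITY" then
      pvPhase2B (cur.map (fun c => (c.1, c.2.1, c.2.2 ++ [t]))) rest
    else
      (match cur with | none => [] | some c => [pvMkRec c]) ++ pvPhase2B none rest

def get_brand_and_related_alt (data : List (List (String × String))) :
    List String × (List (List (String × List String))) × List String :=
  let pairs := pvPairsB data
  let diagnoes := (pairs.filter (fun pt => pt.1 == "DIAGNOSE")).map Prod.snd
  let date := (pairs.filter (fun pt => pt.1 == "DATE")).map Prod.snd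
  let labels := pairs.filter
    (fun pt => !(pt.1 == "O" || pt.1 == "DIAGNOSE" || pt.1 == "DATE"))
  (diagnoes, pvPhase2B none labels, date)

-- ===== PRECONDITION & SPEC =====
def Spec_get_brand_and_related (data : List (List (String × String))) (out : List String × (List (List (String × List String))) × List String) : Prop := out = get_brand_and_related_alt data
instance (data : List (List (String × String))) (out : List String × (List (List (String × List String))) × List String) : Decidable (Spec_get_brand_and_related data out) := by unfold Spec_get_brand_and_related; infer_instance

-- ===== CLAIM (what is proved, stated in full; the proofs are below) =====
def Claim_equal_get_brand_and_related : Prop := ∀ (data : List (List (String × String))), Dom_get_brand_and_related data → Spec_get_brand_and_related data (get_brand_and_related data)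

-- ===== LEMMAS AND PROOFS =====

-- phase 1: A's classifying fold equals B's three filtered projections of the pair list
theorem pvPhase1_eq (data : List (List (String × String)))
    (d dt : List String) (lb : List (String × String)) :
    data.foldl pvStepA (d, dt, lb) =
      (d ++ ((pvPairsB data).filter (fun pt => pt.1 == "DIAGNOSE")).map Prod.snd,
       dt ++ ((pvPairsB data).filter (fun pt => pt.1 == "DATE")).map Prod.snd,
       lb ++ (pvPairsB data).filter
         (fun pt => !(pt.1 == "O" || pt.1 == "DIAGNOSE" || pt.1 == "DATE"))) := by
  induction data generalizing d dt lb with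
  | nil => simp [pvPairsB]
  | cons it rest ih =>
    simp only [List.foldl_cons]
    rcases hp : it.lookup "pred" with _ | p
    · simp only [pvStepA, hp, ih, pvPairsB, List.map_cons, List.filterMap_cons]
    · rcases ht : it.lookup "transcription" with _ | t
      · simp only [pvStepA, hp, ht, pvPairsB, List.map_cons, List.filterMap_cons]
        split_ifs <;> exact ih d dt lb
      · by_cases hO : p = "O"
        · subst hO
          simp [pvStepA, hp, ht, ih, pvPairsB]
        · by_cases hD : p = "DIAGNOSE"
          · subst hD
            simp [pvStepA, hp, ht, ih, pvPairsB]
          · by_cases hE : p = "DATE"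
            · subst hE
              simp [pvStepA, hp, ht, ih, pvPairsB]
            · simp [pvStepA, hp, ht, hO, hD, hE, ih, pvPairsB]

-- phase 2, open-record invariant: running B with an open record (b,u,q) first absorbs
-- exactly the USAGE/QUANTITY prefix A's inner loop pops, then closes the record
theorem pvPhase2B_some (l : List (String × String)) (b u q : List String) :
    pvPhase2B (some (b, u, q)) l =
      pvMkRec (b, (pvInnerA u q l).1, (pvInnerA u q l).2.1) ::
        pvPhase2B none (pvInnerA u q l).2.2 := by
  induction l generalizing u q with
  | nil => simp [pvPhase2B, pvInnerA]
  | cons x rest ih =>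
    obtain ⟨p, t⟩ := x
    by_cases hB : p = "BRANDNAME"
    · subst hB
      simp [pvPhase2B, pvInnerA]
    · by_cases hU : p = "USAGE"
      · subst hU
        simpa [pvPhase2B, pvInnerA] using ih (u ++ [t]) q
      · by_cases hQ : p = "QUANTITY"
        · subst hQ
          simpa [pvPhase2B, pvInnerA, hU] using ih u (q ++ [t])
        · simp [pvPhase2B, pvInnerA, hB, hU, hQ]

theorem pvPhase2_eq (n : Nat) : ∀ l : List (String × String), l.length ≤ n →
    pvPhase2A l = pvPhase2B none l := by
  induction n with
  | zero =>
    intro l hl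
    have : l = [] := List.eq_nil_of_length_eq_zero (Nat.le_zero.mp hl)
    subst this; simp [pvPhase2A, pvPhase2B]
  | succ n ih =>
    intro l hl
    match l with
    | [] => simp [pvPhase2A, pvPhase2B]
    | (p, t) :: rest =>
      by_cases hB : p = "BRANDNAME"
      · subst hB
        have hR : pvPhase2B none (("BRANDNAME", t) :: rest) =
            pvPhase2B (some ([t], [], [])) rest := by simp [pvPhase2B]
        rw [pvPhase2A, if_pos rfl, hR, pvPhase2B_some rest [t] [] []]
        show [("brandname", [t]), ("usage", (pvInnerA [] [] rest).1),
            ("quantity", (pvInnerA [] [] rest).2.1)] ::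
            pvPhase2A (pvInnerA [] [] rest).2.2 = _
        have hlen : (pvInnerA [] [] rest).2.2.length ≤ n :=
          le_trans (pvInnerA_len [] [] rest) (by simpa using Nat.le_of_succ_le_succ hl)
        rw [ih _ hlen]
        simp [pvMkRec]
      · rw [pvPhase2A]
        rw [if_neg hB]
        rw [ih rest (by simpa using Nat.le_of_succ_le_succ hl)]
        by_cases hU : p = "USAGE" <;> by_cases hQ : p = "QUANTITY" <;>
          simp [pvPhase2B, hB, hU, hQ]

-- ===== VERDICT (by name: the statement is the Claim_ definition above) =====
theorem get_brand_and_related_spec : Claim_equal_get_brand_and_related := by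
  intro data _
  unfold Spec_get_brand_and_related get_brand_and_related get_brand_and_related_alt
  rw [pvPhase1_eq data [] [] []]
  simp only [List.nil_append]
  rw [pvPhase2_eq (pvPairsB data).length _ (List.length_filter_le _ _)]
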